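-- pv_equiv track=rewrite | github.com/Randall-Holmes/Randall-Holmes.github.io | Lestrade/Lestrade and Automath (backups)/automath/automath-flagship-3-28.py | AutomathShortList
-- ===== SOURCE A (Python) =====
-- def AutomathShortList(L,C,b):
--     if len(L)==0:  return []
--
--     if (b==True and not(C==[])) and L[0]==C[0]: return AutomathShortList(L[1:],C[1:],True)
--     if len(L) == 1:
--         return [L[0]]
--     if C==[]:Cshorter=[]
--     if not C== []: Cshorter=C[1:]
--     return [L[0]]+AutomathShortList(L[1:],Cshorter,False)
-- ===== SOURCE B (Python) =====
-- def AutomathShortList(L, C, b):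
--     if not b:
--         return L[:]
--     k = 0
--     while k < len(L) and k < len(C) and L[k] == C[k]:
--         k += 1
--     return L[k:]
-- ===== Notes on version B (the rewrite author's own statement) =====
-- stated objective: faster
-- what changed: Replaces the recursive list-slicing rebuild with a single index loop that finds the matched prefix length and slices once (b False returns a copy of L directly).
import Mathlib
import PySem

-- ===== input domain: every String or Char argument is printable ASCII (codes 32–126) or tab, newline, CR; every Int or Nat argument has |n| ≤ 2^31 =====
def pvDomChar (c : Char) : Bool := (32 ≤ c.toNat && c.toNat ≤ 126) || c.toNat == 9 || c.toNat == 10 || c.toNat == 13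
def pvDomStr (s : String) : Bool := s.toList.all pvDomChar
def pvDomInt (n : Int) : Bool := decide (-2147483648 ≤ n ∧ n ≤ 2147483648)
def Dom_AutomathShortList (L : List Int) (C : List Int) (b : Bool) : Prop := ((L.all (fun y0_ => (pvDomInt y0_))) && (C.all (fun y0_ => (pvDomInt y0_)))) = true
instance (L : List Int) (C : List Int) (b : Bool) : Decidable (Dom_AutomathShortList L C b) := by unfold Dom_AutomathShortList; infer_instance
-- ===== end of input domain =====

-- ===== PORT A =====
-- Port of A: literal recursion; on b=False the recursion rebuilds L element by element.
def AutomathShortList (L : List Int) (C : List Int) (b : Bool) : List Int :=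
  match L with
  | [] => []
  | x :: L' =>
    match C with
    | c :: C' =>
      if b = true ∧ x = c then AutomathShortList L' C' true
      else if L' = [] then [x]
      else x :: AutomathShortList L' C' false
    | [] =>
      if L' = [] then [x]
      else x :: AutomathShortList L' [] false

-- ===== PORT B =====
-- B's while loop counting the matched prefix length (k advances while both lists match).
def pvPrefLen : List Int → List Int → Nat
  | x :: L', c :: C' => if x = c then pvPrefLen L' C' + 1 else 0
  | _, _ => 0

-- Port of B: one prefix-length scan, one drop; b=False returns L as-is.
def AutomathShortList_alt (L : List Int) (C : List Int) (b : Bool) : List Int :=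
  if b then L.drop (pvPrefLen L C) else L

-- ===== PRECONDITION & SPEC =====
def Spec_AutomathShortList (L : List Int) (C : List Int) (b : Bool) (out : List Int) : Prop := out = AutomathShortList_alt L C b
instance (L : List Int) (C : List Int) (b : Bool) (out : List Int) : Decidable (Spec_AutomathShortList L C b out) := by unfold Spec_AutomathShortList; infer_instance

-- ===== CLAIM (what is proved, stated in full; the proofs are below) =====
def Claim_equal_AutomathShortList : Prop := ∀ (L : List Int) (C : List Int) (b : Bool), Dom_AutomathShortList L C b → Spec_AutomathShortList L C b (AutomathShortList L C b)

-- ===== LEMMAS AND PROOFS =====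

-- ===== VERDICT (by name: the statement is the Claim_ definition above) =====
-- On b = False, A's recursion just copies L.
theorem A_false (L C : List Int) : AutomathShortList L C false = L := by
  induction L generalizing C with
  | nil => rfl
  | cons x L' ih =>
    cases C with
    | nil =>
      simp only [AutomathShortList]
      split
      · simp [*]
      · rw [ih]
    | cons c C' =>
      simp only [AutomathShortList]
      rw [if_neg (by simp)]
      split
      · simp [*]
      · rw [ih]

theorem A_eq_alt (L C : List Int) (b : Bool) :
    AutomathShortList L C b = AutomathShortList_alt L C b := by
  induction L generalizing C b with
  | nil => cases b <;> simp [AutomathShortList, AutomathShortList_alt]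
  | cons x L' ih =>
    cases b with
    | false => simp [AutomathShortList_alt, A_false]
    | true =>
      cases C with
      | nil =>
        simp only [AutomathShortList, AutomathShortList_alt, pvPrefLen]
        split
        · simp [*]
        · rw [A_false]; simp
      | cons c C' =>
        by_cases h : x = c
        · simp only [AutomathShortList, AutomathShortList_alt, pvPrefLen]
          rw [if_pos ⟨trivial, h⟩, if_pos h]
          simpa [AutomathShortList_alt] using ih C' true
        · simp only [AutomathShortList, AutomathShortList_alt, pvPrefLen]
          rw [if_neg (by simp [h]), if_neg h]
          split
          · simp [*]
          · rw [A_false]; simp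


theorem AutomathShortList_spec : Claim_equal_AutomathShortList := by
  intro L C b _
  exact A_eq_alt L C b
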